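-- pv_equiv track=rewrite | github.com/toms-code-katas/prime-numbers-python | primes/calculate_primes.py | calculate_primes
-- ===== SOURCE A (Python) =====
-- PRIMES_TO_TEN = [2, 3, 5, 7]
--
-- class InvalidRangeException(Exception):
--     pass
--
-- def calculate_primes(start=0, stop=100):
--     """
--     Calculates all primes from start to end
--     :param start: The number to start from
--     :param stop: The number to end
--     :return: The primes between start and end
--     """
--
--     if start < 0 or stop < 0:
--         raise InvalidRangeException()
--
--     primes = []
--     for number in range(start, stop + 1):
--         if number in PRIMES_TO_TEN:
--             primes.append(number)
--         elif number == 1: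
--             continue
--
--         is_prime = True
--         for divisor in PRIMES_TO_TEN:
--             if number % divisor == 0:
--                 is_prime = False
--                 break
--         if is_prime:
--             primes.append(number)
--
--     return primes
-- ===== SOURCE B (Python) =====
-- PRIMES_TO_TEN = [2, 3, 5, 7]
--
-- class InvalidRangeException(Exception):
--     pass
--
-- def calculate_primes(start=0, stop=100):
--     if start < 0 or stop < 0:
--         raise InvalidRangeException()
--     survivors = set(range(start, stop + 1))
--     for d in PRIMES_TO_TEN:
--         first = ((start + d - 1) // d) * d
--         for m in range(first, stop + 1, d):
--             survivors.discard(m)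
--     survivors.discard(1)
--     for p in PRIMES_TO_TEN:
--         if start <= p <= stop:
--             survivors.add(p)
--     return sorted(survivors)
-- ===== Notes on version B (the rewrite author's own statement) =====
-- stated objective: alternative
-- what changed: Instead of testing each number of the range against every divisor, B starts from set(range(start, stop+1)) and strides over each divisor d in (2,3,5,7) discarding its multiples, then removes 1, re-adds the in-range divisors, and returns sorted(set); Pre_ excludes start<0 or stop<0, where A raises InvalidRangeException.
import Mathlib
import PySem

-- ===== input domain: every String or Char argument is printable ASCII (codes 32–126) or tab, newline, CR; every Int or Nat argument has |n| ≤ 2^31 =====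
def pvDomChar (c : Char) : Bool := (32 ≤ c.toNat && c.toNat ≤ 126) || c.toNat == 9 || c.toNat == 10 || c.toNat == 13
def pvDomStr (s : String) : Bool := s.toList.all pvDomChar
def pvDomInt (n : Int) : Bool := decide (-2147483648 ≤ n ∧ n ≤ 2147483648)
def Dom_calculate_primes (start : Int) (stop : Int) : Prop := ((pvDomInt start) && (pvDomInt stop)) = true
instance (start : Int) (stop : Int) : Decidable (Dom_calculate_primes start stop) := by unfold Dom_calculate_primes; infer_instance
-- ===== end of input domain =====

-- B replaces A's per-number divisor test by per-divisor striding over a set of the whole range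
-- (discard the multiples of each of 2,3,5,7, discard 1, re-add the in-range divisors, return
-- sorted(set)): an alternative algorithm, not measured faster; equal return values on Pre_.

-- ===== PORT A =====
def PRIMES_TO_TEN : List Int := [2, 3, 5, 7]

-- inner loop: 'for divisor in PRIMES_TO_TEN: if number % divisor == 0: is_prime = False; break'
def pvIsPrimeLoop (number : Int) : Bool :=
  PRIMES_TO_TEN.foldl (fun is_prime divisor =>
    if PySem.Int.mod number divisor = 0 then false else is_prime) true

def calculate_primes (start : Int) (stop : Int) : List Int :=
  -- 'if start < 0 or stop < 0: raise InvalidRangeException()' — excluded by Pre_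
  (PySem.List.pyRange start (stop + 1) 1).foldl (fun primes number =>
    if number ∈ PRIMES_TO_TEN then
      let primes := primes ++ [number]
      if pvIsPrimeLoop number then primes ++ [number] else primes
    else if number = 1 then primes            -- 'continue'
    else if pvIsPrimeLoop number then primes ++ [number] else primes) []

-- ===== PORT B =====
def calculate_primes_alt (start : Int) (stop : Int) : List Int :=
  -- same guard as A: raises on start < 0 or stop < 0 — excluded by Pre_
  let survivors : PySem.Set Int := PySem.Set.ofList (PySem.List.pyRange start (stop + 1) 1)
  let survivors := PRIMES_TO_TEN.foldl (fun s d =>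
    (PySem.List.pyRange (PySem.Int.floordiv (start + d - 1) d * d) (stop + 1) d).foldl
      PySem.Set.discard s) survivors
  let survivors := PySem.Set.discard survivors 1
  let survivors := PRIMES_TO_TEN.foldl (fun s p =>
    if start ≤ p ∧ p ≤ stop then PySem.Set.add s p else s) survivors
  PySem.List.sorted survivors (fun x => x) false

-- ===== PRECONDITION & SPEC =====
-- A raises InvalidRangeException iff start < 0 or stop < 0; Pre_ excludes exactly those inputs.
def Pre_calculate_primes (start : Int) (stop : Int) : Prop := 0 ≤ start ∧ 0 ≤ stop
instance (start : Int) (stop : Int) : Decidable (Pre_calculate_primes start stop) := by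
  unfold Pre_calculate_primes; infer_instance

def pvWitness_calculate_primes : Int × Int := (0, 30)

def Spec_calculate_primes (start : Int) (stop : Int) (out : List Int) : Prop := out = calculate_primes_alt start stop
instance (start : Int) (stop : Int) (out : List Int) : Decidable (Spec_calculate_primes start stop out) := by unfold Spec_calculate_primes; infer_instance

-- ===== CLAIM (what is proved, stated in full; the proofs are below) =====
def Claim_equal_calculate_primes : Prop := ∀ (start : Int) (stop : Int), Dom_calculate_primes start stop → Pre_calculate_primes start stop → Spec_calculate_primes start stop (calculate_primes start stop)

-- ===== LEMMAS AND PROOFS =====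

-- the per-number test both programs realise
def pvKeep (n : Int) : Bool :=
  if n ∈ PRIMES_TO_TEN then true else if n = 1 then false else pvIsPrimeLoop n

theorem pvIsPrimeLoop_false_of_mem (n : Int) (h : n ∈ PRIMES_TO_TEN) :
    pvIsPrimeLoop n = false := by
  simp only [PRIMES_TO_TEN, List.mem_cons, List.not_mem_nil, or_false] at h
  rcases h with rfl | rfl | rfl | rfl <;> decide

theorem pvA_step (acc : List Int) (n : Int) :
    (if n ∈ PRIMES_TO_TEN then
       let primes := acc ++ [n]
       if pvIsPrimeLoop n then primes ++ [n] else primes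
     else if n = 1 then acc
     else if pvIsPrimeLoop n then acc ++ [n] else acc)
      = if pvKeep n then acc ++ [n] else acc := by
  by_cases hm : n ∈ PRIMES_TO_TEN
  · simp [hm, pvKeep, pvIsPrimeLoop_false_of_mem n hm]
  · by_cases h1 : n = 1
    · subst h1; simp [pvKeep, hm]
    · simp [hm, h1, pvKeep]

theorem pvA_eq_filter (start stop : Int) :
    calculate_primes start stop
      = (PySem.List.pyRange start (stop + 1) 1).filter pvKeep := by
  unfold calculate_primes
  have h : (fun (primes : List Int) (number : Int) =>
      if number ∈ PRIMES_TO_TEN then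
        let primes := primes ++ [number]
        if pvIsPrimeLoop number then primes ++ [number] else primes
      else if number = 1 then primes
      else if pvIsPrimeLoop number then primes ++ [number] else primes)
      = fun (primes : List Int) (number : Int) =>
          if pvKeep number then primes ++ [number] else primes := by
    funext acc n; exact pvA_step acc n
  rw [h, PySem.List.foldl_append_if_eq_filter]
  simp

theorem pv_mem_foldl_discard (ms : List Int) (s : PySem.Set Int) (n : Int) :
    n ∈ ms.foldl PySem.Set.discard s ↔ n ∈ s ∧ n ∉ ms := by
  induction ms generalizing s with
  | nil => simp
  | cons m t ih =>
    simp only [List.foldl_cons, ih, PySem.Set.mem_discard, List.mem_cons]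
    tauto

theorem pv_nodup_foldl_discard (ms : List Int) (s : PySem.Set Int) (h : s.Nodup) :
    (ms.foldl PySem.Set.discard s).Nodup := by
  induction ms generalizing s with
  | nil => exact h
  | cons m t ih => exact ih _ (PySem.Set.nodup_discard s m h)

theorem pv_mem_stride (start stop d n : Int) (hd : 0 < d) :
    n ∈ PySem.List.pyRange (PySem.Int.floordiv (start + d - 1) d * d) (stop + 1) d
      ↔ d ∣ n ∧ start ≤ n ∧ n ≤ stop := by
  rw [PySem.List.mem_pyRange_iff_of_pos hd]
  have h1 := PySem.Int.floordiv_mul_add_mod (start + d - 1) d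
  have h2 := PySem.Int.mod_nonneg (start + d - 1) hd
  have h3 := PySem.Int.mod_lt (start + d - 1) hd
  set q := PySem.Int.floordiv (start + d - 1) d with hqdef
  set r := PySem.Int.mod (start + d - 1) d with hrdef
  constructor
  · rintro ⟨hle, hlt, k, hk⟩
    refine ⟨⟨k + q, by rw [mul_add]; linarith [mul_comm d q]⟩, by linarith, by omega⟩
  · rintro ⟨⟨m, hm⟩, hge, hle⟩
    have hq_lt : q * d < (m + 1) * d := by
      have e1 : (m + 1) * d = m * d + d := by ring
      rw [e1]; linarith [mul_comm d m]
    have hq_le_m : q ≤ m := by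
      have := lt_of_mul_lt_mul_right hq_lt (le_of_lt hd)
      omega
    have hqm : q * d ≤ m * d := mul_le_mul_of_nonneg_right hq_le_m (le_of_lt hd)
    exact ⟨by linarith [mul_comm d m], by omega, ⟨m - q, by rw [mul_sub]; linarith [mul_comm d q, mul_comm d m]⟩⟩

-- the outer divisor loop of B: strike the in-range multiples of every d in ds
theorem pv_mem_divisor_fold (ds : List Int) (start stop : Int) (s : PySem.Set Int) (n : Int)
    (hpos : ∀ d ∈ ds, 0 < d) :
    n ∈ ds.foldl (fun s d =>
        (PySem.List.pyRange (PySem.Int.floordiv (start + d - 1) d * d) (stop + 1) d).foldl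
          PySem.Set.discard s) s
      ↔ n ∈ s ∧ ∀ d ∈ ds, ¬(d ∣ n ∧ start ≤ n ∧ n ≤ stop) := by
  induction ds generalizing s with
  | nil => simp
  | cons d t ih =>
    have hd := hpos d (List.mem_cons_self ..)
    simp only [List.foldl_cons, ih _ (fun x hx => hpos x (List.mem_cons_of_mem d hx)),
      pv_mem_foldl_discard, pv_mem_stride start stop d n hd, List.forall_mem_cons]
    tauto

theorem pv_nodup_divisor_fold (ds : List Int) (start stop : Int) (s : PySem.Set Int)
    (h : s.Nodup) :
    (ds.foldl (fun s d =>
        (PySem.List.pyRange (PySem.Int.floordiv (start + d - 1) d * d) (stop + 1) d).foldl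
          PySem.Set.discard s) s).Nodup := by
  induction ds generalizing s with
  | nil => exact h
  | cons d t ih => exact ih _ (pv_nodup_foldl_discard _ _ h)

theorem pv_mem_foldl_add (ps : List Int) (start stop : Int) (s : PySem.Set Int) (n : Int) :
    n ∈ ps.foldl (fun s p => if start ≤ p ∧ p ≤ stop then PySem.Set.add s p else s) s
      ↔ n ∈ s ∨ (n ∈ ps ∧ start ≤ n ∧ n ≤ stop) := by
  induction ps generalizing s with
  | nil => simp
  | cons p t ih =>
    simp only [List.foldl_cons, ih, List.mem_cons]
    by_cases h : start ≤ p ∧ p ≤ stop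
    · simp only [if_pos h, PySem.Set.mem_add]
      constructor
      · rintro ((hn | rfl) | ht) <;> tauto
      · rintro (hn | ⟨(rfl | hnt), hb⟩) <;> tauto
    · simp only [if_neg h]
      constructor
      · rintro (hn | ht) <;> tauto
      · rintro (hn | ⟨(rfl | hnt), hb⟩) <;> tauto
  
theorem pv_nodup_foldl_add (ps : List Int) (start stop : Int) (s : PySem.Set Int) (h : s.Nodup) :
    (ps.foldl (fun s p => if start ≤ p ∧ p ≤ stop then PySem.Set.add s p else s) s).Nodup := by
  induction ps generalizing s with
  | nil => exact h
  | cons p t ih =>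
    simp only [List.foldl_cons]
    by_cases hc : start ≤ p ∧ p ≤ stop
    · rw [if_pos hc]; exact ih _ (PySem.Set.nodup_add s p h)
    · rw [if_neg hc]; exact ih _ h

set_option maxHeartbeats 1000000 in
theorem pvKeep_iff (n : Int) :
    pvKeep n = true ↔ ((n = 2 ∨ n = 3 ∨ n = 5 ∨ n = 7) ∨
      (n ≠ 1 ∧ ¬(2:Int) ∣ n ∧ ¬(3:Int) ∣ n ∧ ¬(5:Int) ∣ n ∧ ¬(7:Int) ∣ n)) := by
  simp only [pvKeep, pvIsPrimeLoop, PRIMES_TO_TEN, List.mem_cons, List.not_mem_nil, or_false,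
    List.foldl_cons, List.foldl_nil]
  split_ifs with hmem h1 hm2 hm3 hm5 hm7 <;>
    simp_all

set_option maxHeartbeats 1000000 in
theorem pvB_eq_filter (start stop : Int) :
    calculate_primes_alt start stop
      = (PySem.List.pyRange start (stop + 1) 1).filter pvKeep := by
  unfold calculate_primes_alt
  apply PySem.List.sorted_eq_of_perm_of_pairwise_lt
  · have hndS : (PRIMES_TO_TEN.foldl
        (fun s p => if start ≤ p ∧ p ≤ stop then PySem.Set.add s p else s)
        (PySem.Set.discard
          (PRIMES_TO_TEN.foldl (fun s d =>
            (PySem.List.pyRange (PySem.Int.floordiv (start + d - 1) d * d) (stop + 1) d).foldl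
              PySem.Set.discard s)
            (PySem.Set.ofList (PySem.List.pyRange start (stop + 1) 1))) 1)).Nodup :=
      pv_nodup_foldl_add _ _ _ _
        (PySem.Set.nodup_discard _ _
          (pv_nodup_divisor_fold _ _ _ _ (PySem.Set.nodup_ofList _)))
    rw [List.perm_ext_iff_of_nodup
      ((PySem.List.nodup_pyRange_one start (stop + 1)).filter pvKeep) hndS]
    intro n
    rw [List.mem_filter, pvKeep_iff, pv_mem_foldl_add, PySem.Set.mem_discard,
      pv_mem_divisor_fold PRIMES_TO_TEN start stop _ n (by decide),
      PySem.Set.mem_ofList, PySem.List.mem_pyRange_one]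
    simp only [PRIMES_TO_TEN, List.mem_cons, List.not_mem_nil, or_false, Int.lt_add_one_iff]
    have h2 : n = 2 → (2:Int) ∣ n := by rintro rfl; decide
    have h3 : n = 3 → (3:Int) ∣ n := by rintro rfl; decide
    have h5 : n = 5 → (5:Int) ∣ n := by rintro rfl; decide
    have h7 : n = 7 → (7:Int) ∣ n := by rintro rfl; decide
    constructor
    · rintro ⟨hr, hk⟩
      rcases hk with hp | ⟨h1, hd2, hd3, hd5, hd7⟩
      · exact Or.inr ⟨hp, hr.1, hr.2⟩
      · refine Or.inl ⟨⟨hr, ?_⟩, h1⟩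
        rintro d (rfl | rfl | rfl | rfl) <;> tauto
    · rintro (⟨⟨hr, hall⟩, h1⟩ | ⟨hp, hge, hle⟩)
      · have hc2 := hall 2 (Or.inl rfl)
        have hc3 := hall 3 (Or.inr (Or.inl rfl))
        have hc5 := hall 5 (Or.inr (Or.inr (Or.inl rfl)))
        have hc7 := hall 7 (Or.inr (Or.inr (Or.inr rfl)))
        refine ⟨hr, Or.inr ⟨h1, ?_, ?_, ?_, ?_⟩⟩ <;> tauto
      · exact ⟨⟨hge, hle⟩, Or.inl hp⟩
  · exact (PySem.List.pairwise_lt_pyRange_one start (stop + 1)).filter pvKeep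

-- ===== VERDICT (by name: the statement is the Claim_ definition above) =====
theorem calculate_primes_spec : Claim_equal_calculate_primes := by
  intro start stop _ _
  unfold Spec_calculate_primes
  rw [pvA_eq_filter, pvB_eq_filter]
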